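-- pv_equiv track=rewrite | github.com/raven-computing/project-init | docs/generate_api_docs.py | parse_obj_key_list_returns
-- ===== SOURCE A (Python) =====
-- def parse_obj_key_list_returns(key_lines):
--     """Parses the specified lines representing the documentation
--     main text's "Returns" segment.
--
--     Args:
--         key_lines: The documentation main text's "Returns" lines,
--             as a list of str.
--
--     Returns:
--         A list holding a list of size 2 for each declared return value.
--         The first item of each inner list is the return value,
--         the second item is the return value's doc text.
--     """
--     key_lines = [line.strip() for line in key_lines]
--     key_text = "\n".join(key_lines)
--     key_list = []
--
--     lines = key_text.split("\n")
--     begins = [i for i, line in enumerate(lines) if " - " in line]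
--
--     for i, begin_idx in enumerate(begins):
--         line = lines[begin_idx]
--         tokens = line.split(" - ")
--         retval = tokens[0].strip()
--         rettext = tokens[1].strip().strip("-").strip()
--         sfrom = begin_idx+1
--         suntil = len(lines) if (i == len(begins)-1) else begins[i+1]
--         to_append = " ".join(lines[sfrom:suntil])
--         rettext += " " + to_append
--         key_list.append([retval, rettext])
--
--     return key_list
-- ===== SOURCE B (Python) =====
-- def parse_obj_key_list_returns(key_lines):
--     lines = "\n".join(line.strip() for line in key_lines).split("\n")
--     key_list = []
--     current = None  # (retval, base_text, continuation_lines)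
--     for line in lines:
--         if " - " in line:
--             if current is not None:
--                 key_list.append([current[0], current[1] + " " + " ".join(current[2])])
--             tokens = line.split(" - ")
--             current = (tokens[0].strip(), tokens[1].strip().strip("-").strip(), [])
--         elif current is not None:
--             current[2].append(line)
--     if current is not None:
--         key_list.append([current[0], current[1] + " " + " ".join(current[2])])
--     return key_list
-- ===== Notes on version B (the rewrite author's own statement) =====
-- stated objective: alternative
-- what changed: Replaces A's two-phase begins-index collection plus index slicing (enumerate/filter then per-entry lines[sfrom:suntil] slices) with a single streaming pass that maintains one open entry and its continuation lines.
import Mathlib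
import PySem

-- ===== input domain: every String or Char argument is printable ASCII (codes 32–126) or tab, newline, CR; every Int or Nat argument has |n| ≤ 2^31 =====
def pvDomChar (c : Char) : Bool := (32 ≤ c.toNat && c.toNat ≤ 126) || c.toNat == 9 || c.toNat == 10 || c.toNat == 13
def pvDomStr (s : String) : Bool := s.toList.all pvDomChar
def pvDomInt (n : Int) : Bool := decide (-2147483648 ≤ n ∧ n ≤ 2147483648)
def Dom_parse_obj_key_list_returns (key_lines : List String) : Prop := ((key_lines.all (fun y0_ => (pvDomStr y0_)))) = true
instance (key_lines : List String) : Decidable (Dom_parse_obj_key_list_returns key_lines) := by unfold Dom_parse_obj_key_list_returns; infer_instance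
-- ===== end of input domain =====

-- B replaces A's begins-index collection + slicing with one streaming pass keeping an open entry (alternative decomposition, same results).

-- ===== PORT A =====
-- literal transliteration of A: strip lines, join/split on newline, collect begin indices, then slice between consecutive begins.
-- tokens[0] / tokens[1] are read with pyGet?/getD: the index is always in range because the line contains " - ".
def parse_obj_key_list_returns (key_lines : List String) : List (List String) :=
  let key_lines' := key_lines.map (fun line => PySem.Str.strip line)
  let key_text := PySem.Str.join "\n" key_lines'
  let lines := ((PySem.Str.split? key_text "\n").getD [])
  let begins := ((PySem.List.enumerate lines).filter (fun p => PySem.Str.isIn " - " p.2)).map (·.1)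
  (PySem.List.enumerate begins).foldl (fun key_list ib =>
    let line := (PySem.List.pyGet? lines ib.2).getD ""
    let tokens := ((PySem.Str.split? line " - ").getD [])
    let retval := PySem.Str.strip ((PySem.List.pyGet? tokens 0).getD "")
    let rettext := PySem.Str.strip (PySem.Str.stripChars (PySem.Str.strip ((PySem.List.pyGet? tokens 1).getD "")) "-")
    let sfrom := ib.2 + 1
    let suntil := if ib.1 == (begins.length : Int) - 1 then (lines.length : Int)
                  else (PySem.List.pyGet? begins (ib.1 + 1)).getD 0
    let to_append := PySem.Str.join " " (PySem.List.slice lines (some sfrom) (some suntil))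
    key_list ++ [[retval, rettext ++ " " ++ to_append]]) []

-- ===== PORT B =====
-- B-side helpers: finalize an open entry, and the per-line step of the streaming pass.
def pvBFin (c : String × String × List String) : List String :=
  [c.1, c.2.1 ++ " " ++ PySem.Str.join " " c.2.2]

def pvBStep (st : List (List String) × Option (String × String × List String)) (line : String) :
    List (List String) × Option (String × String × List String) :=
  if PySem.Str.isIn " - " line then
    let key_list := match st.2 with | none => st.1 | some c => st.1 ++ [pvBFin c]
    let tokens := ((PySem.Str.split? line " - ").getD [])
    (key_list, some (PySem.Str.strip ((PySem.List.pyGet? tokens 0).getD ""),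
                     PySem.Str.strip (PySem.Str.stripChars (PySem.Str.strip ((PySem.List.pyGet? tokens 1).getD "")) "-"),
                     ([] : List String)))
  else
    match st.2 with
    | none => st
    | some c => (st.1, some (c.1, c.2.1, c.2.2 ++ [line]))

def parse_obj_key_list_returns_alt (key_lines : List String) : List (List String) :=
  let lines := ((PySem.Str.split? (PySem.Str.join "\n" (key_lines.map (fun line => PySem.Str.strip line))) "\n").getD [])
  let st := lines.foldl pvBStep ([], none)
  match st.2 with | none => st.1 | some c => st.1 ++ [pvBFin c]

-- ===== PRECONDITION & SPEC =====
def Spec_parse_obj_key_list_returns (key_lines : List String) (out : List (List String)) : Prop := out = parse_obj_key_list_returns_alt key_lines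
instance (key_lines : List String) (out : List (List String)) : Decidable (Spec_parse_obj_key_list_returns key_lines out) := by unfold Spec_parse_obj_key_list_returns; infer_instance

-- ===== CLAIM (what is proved, stated in full; the proofs are below) =====
def Claim_equal_parse_obj_key_list_returns : Prop := ∀ (key_lines : List String), Dom_parse_obj_key_list_returns key_lines → Spec_parse_obj_key_list_returns key_lines (parse_obj_key_list_returns key_lines)

-- ===== LEMMAS AND PROOFS =====

def sepL (l : String) : Bool := PySem.Str.isIn " - " l

def retvalOf (l : String) : String :=
  PySem.Str.strip ((PySem.List.pyGet? (((PySem.Str.split? l " - ").getD [])) 0).getD "")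

def baseOf (l : String) : String :=
  PySem.Str.strip (PySem.Str.stripChars (PySem.Str.strip ((PySem.List.pyGet? (((PySem.Str.split? l " - ").getD [])) 1).getD "")) "-")

def entryE (l : String) (cont : List String) : List String :=
  [retvalOf l, baseOf l ++ " " ++ PySem.Str.join " " cont]

def specP : List String → List (List String)
  | [] => []
  | l :: ls => if sepL l then entryE l (ls.takeWhile (fun x => !sepL x)) :: specP ls else specP ls

def beginsOf (lines : List String) : List Int :=
  ((PySem.List.enumerate lines).filter (fun p => PySem.Str.isIn " - " p.2)).map (·.1)

def pvABody (lines : List String) (ib : Int × Int) : List String :=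
  entryE ((PySem.List.pyGet? lines ib.2).getD "")
    (PySem.List.slice lines (some (ib.2 + 1))
      (some (if ib.1 == ((beginsOf lines).length : Int) - 1 then ((lines.length : Nat) : Int)
             else (PySem.List.pyGet? (beginsOf lines) (ib.1 + 1)).getD 0)))

lemma bLoop_some (ls : List String) (res : List (List String)) (c : String × String × List String) :
    (match (ls.foldl pvBStep (res, some c)).2 with
     | none => (ls.foldl pvBStep (res, some c)).1
     | some d => (ls.foldl pvBStep (res, some c)).1 ++ [pvBFin d])
    = res ++ [pvBFin (c.1, c.2.1, c.2.2 ++ ls.takeWhile (fun x => !sepL x))] ++ specP ls := by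
  induction ls generalizing res c with
  | nil => simp [pvBFin, specP]
  | cons l ls ih =>
    by_cases h : PySem.Str.isIn " - " l
    · have h2 : PySem.Chars.isIn [' ', '-', ' '] l.toList = true := by simpa using h
      simp only [List.foldl_cons, pvBStep, h, if_pos]
      rw [ih]
      simp [specP, sepL, h2, entryE, pvBFin, retvalOf, baseOf]
    · have h2 : PySem.Chars.isIn [' ', '-', ' '] l.toList = false := by simpa using h
      simp only [List.foldl_cons, pvBStep, h, if_neg, Bool.false_eq_true, not_false_iff]
      rw [ih]
      simp [specP, sepL, h2]

lemma bLoop_none (ls : List String) (res : List (List String)) :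
    (match (ls.foldl pvBStep (res, none)).2 with
     | none => (ls.foldl pvBStep (res, none)).1
     | some d => (ls.foldl pvBStep (res, none)).1 ++ [pvBFin d])
    = res ++ specP ls := by
  induction ls generalizing res with
  | nil => simp [specP]
  | cons l ls ih =>
    by_cases h : PySem.Str.isIn " - " l
    · have h2 : PySem.Chars.isIn [' ', '-', ' '] l.toList = true := by simpa using h
      simp only [List.foldl_cons, pvBStep, h, if_pos]
      rw [bLoop_some]
      simp [specP, sepL, h2, entryE, pvBFin, retvalOf, baseOf]
    · have h2 : PySem.Chars.isIn [' ', '-', ' '] l.toList = false := by simpa using h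
      simp only [List.foldl_cons, pvBStep, h, if_neg, Bool.false_eq_true, not_false_iff]
      rw [ih]
      simp [specP, sepL, h2]

lemma enumerate_shift {α : Type} (xs : List α) (s : Int) :
    PySem.List.enumerate xs (s + 1) = (PySem.List.enumerate xs s).map (fun p => (p.1 + 1, p.2)) := by
  induction xs generalizing s with
  | nil => simp [PySem.List.enumerate]
  | cons x xs ih => simp [PySem.List.enumerate_cons, ih (s + 1)]

lemma enumerate_map {α β : Type} (g : α → β) (xs : List α) (s : Int) :
    PySem.List.enumerate (xs.map g) s = (PySem.List.enumerate xs s).map (fun p => (p.1, g p.2)) := by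
  induction xs generalizing s with
  | nil => simp [PySem.List.enumerate]
  | cons x xs ih => simp [PySem.List.enumerate_cons, ih (s + 1)]

lemma beginsOf_cons (l : String) (ls : List String) :
    beginsOf (l :: ls) = (if sepL l then [(0 : Int)] else []) ++ (beginsOf ls).map (· + 1) := by
  unfold beginsOf
  rw [PySem.List.enumerate_cons]
  rw [show (0 : Int) + 1 = 0 + 1 from rfl, enumerate_shift]
  rw [List.filter_cons, List.filter_map, List.map_map]
  by_cases h : sepL l
  · have h' : PySem.Str.isIn " - " l = true := h
    simp only [h', if_pos, List.map_cons, sepL]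
    simp [Function.comp_def]
  · have h' : PySem.Str.isIn " - " l = false := by simpa using h
    simp only [sepL, h', Bool.false_eq_true, if_neg, not_false_iff]
    simp [Function.comp_def]

lemma mem_beginsOf {b : Int} {lines : List String} (h : b ∈ beginsOf lines) :
    ∃ k : Nat, b = (k : Int) ∧ k < lines.length := by
  unfold beginsOf at h
  simp only [List.mem_map, List.mem_filter] at h
  obtain ⟨p, ⟨hp, _⟩, rfl⟩ := h
  rw [PySem.List.mem_enumerate_iff] at hp
  obtain ⟨k, hk, rfl⟩ := hp
  exact ⟨k, by simp, hk⟩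

lemma firstBegin (ls : List String) :
    ((beginsOf ls).head?.getD (ls.length : Int)) = ((ls.takeWhile (fun x => !sepL x)).length : Int) := by
  induction ls with
  | nil => simp [beginsOf, PySem.List.enumerate]
  | cons l ls ih =>
    rw [beginsOf_cons]
    by_cases h : sepL l
    · simp [h, Option.getD]
    · have h' : sepL l = false := by simpa using h
      simp only [h', Bool.false_eq_true, if_neg, not_false_iff, List.nil_append,
        List.takeWhile_cons, Bool.not_false, if_pos, List.length_cons]
      cases hB : beginsOf ls with
      | nil => rw [hB] at ih; simp at ih ⊢; omega
      | cons b bs => rw [hB] at ih; simp at ih ⊢; omega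

lemma slice_shift {α : Type} (x : α) (xs : List α) (a b : Int) (ha : 0 ≤ a) (hb : 0 ≤ b) :
    PySem.List.slice (x :: xs) (some (a + 1)) (some (b + 1)) = PySem.List.slice xs (some a) (some b) := by
  rw [PySem.List.slice_toNat _ (by omega) (by omega), PySem.List.slice_toNat _ ha hb]
  have h2 : (b + 1).toNat - (a + 1).toNat = b.toNat - a.toNat := by omega
  rw [show (a + 1).toNat = a.toNat + 1 by omega] at h2 ⊢
  rw [h2, List.drop_succ_cons]

lemma pyGet_cons_shift {α : Type} (x : α) (xs : List α) (m : Nat) :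
    PySem.List.pyGet? (x :: xs) ((m : Int) + 1) = PySem.List.pyGet? xs (m : Int) := by
  rw [show ((m : Int) + 1) = ((m + 1 : Nat) : Int) by push_cast; ring]
  rw [PySem.List.pyGet?_natCast, PySem.List.pyGet?_natCast]
  simp

lemma bodyA_shift (l : String) (ls : List String) (o : Nat)
    (hB : beginsOf (l :: ls) = List.replicate o (0 : Int) ++ (beginsOf ls).map (· + 1))
    (k m : Nat) (hk : k < (beginsOf ls).length) (_hbk : (beginsOf ls)[k] = (m : Int)) (_hm : m < ls.length) :
    pvABody (l :: ls) ((k : Int) + (o : Int), (m : Int) + 1) = pvABody ls ((k : Int), (m : Int)) := by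
  unfold pvABody
  rw [hB, pyGet_cons_shift]
  simp only [List.length_append, List.length_replicate, List.length_map, beq_iff_eq]
  congr 1
  by_cases hlast : k = (beginsOf ls).length - 1
  · rw [if_pos (by omega), if_pos (by omega)]
    rw [show (((l :: ls).length : Nat) : Int) = ((ls.length : Nat) : Int) + 1 by simp]
    exact slice_shift l ls ((m : Int) + 1) ((ls.length : Nat) : Int) (by omega) (by omega)
  · rw [if_neg (by omega), if_neg (by omega)]
    have hk1 : k + 1 < (beginsOf ls).length := by omega
    obtain ⟨m', hm', _⟩ := mem_beginsOf (List.getElem_mem hk1)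
    rw [show ((k : Int) + (o : Int) + 1) = ((k + o + 1 : Nat) : Int) by push_cast; ring,
        PySem.List.pyGet?_natCast,
        show ((k : Int) + 1) = ((k + 1 : Nat) : Int) by push_cast; ring,
        PySem.List.pyGet?_natCast]
    rw [List.getElem?_append_right (by simp; omega)]
    simp only [List.length_replicate]
    rw [show k + o + 1 - o = k + 1 by omega]
    rw [List.getElem?_map]
    rw [List.getElem?_eq_getElem hk1, hm']
    simp only [Option.map_some, Option.getD_some]
    exact slice_shift l ls ((m : Int) + 1) ((m' : Nat) : Int) (by omega) (by omega)

lemma take_takeWhile_sep (ls : List String) :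
    ls.take (ls.takeWhile (fun x => !sepL x)).length = ls.takeWhile (fun x => !sepL x) :=
  (List.prefix_iff_eq_take.mp (List.takeWhile_prefix _)).symm

lemma bodyA_head (l : String) (ls : List String) (h : sepL l = true) :
    pvABody (l :: ls) (0, 0) = entryE l (ls.takeWhile (fun x => !sepL x)) := by
  unfold pvABody
  rw [beginsOf_cons, h, if_pos rfl, List.singleton_append]
  have hget : (PySem.List.pyGet? (l :: ls) 0).getD "" = l := by
    rw [show (0 : Int) = ((0 : Nat) : Int) from rfl, PySem.List.pyGet?_natCast]; rfl
  rw [hget]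
  have hfb := firstBegin ls
  congr 1
  simp only [List.length_cons, List.length_map, beq_iff_eq]
  by_cases hB : beginsOf ls = []
  · rw [if_pos (by rw [hB]; simp)]
    rw [hB] at hfb; simp only [List.head?_nil, Option.getD_none] at hfb
    rw [show ((0 : Int) + 1) = ((0 : Nat) : Int) + 1 from rfl,
        show (((ls.length + 1 : Nat)) : Int) = ((ls.length : Nat) : Int) + 1 by push_cast; ring,
        slice_shift l ls _ _ (by omega) (by omega)]
    simp only [Nat.cast_zero]
    rw [PySem.List.slice_zero_start, PySem.List.slice_to _ (by omega)]
    simp only [Int.toNat_natCast, List.take_length]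
    have hlen : (ls.takeWhile (fun x => !sepL x)).length = ls.length := by exact_mod_cast hfb.symm
    have h3 := take_takeWhile_sep ls
    rw [hlen, List.take_length] at h3
    exact h3
  · obtain ⟨b, bs, hbbs⟩ := List.exists_cons_of_ne_nil hB
    rw [if_neg (by rw [hbbs]; simp; omega)]
    rw [hbbs] at hfb; simp only [List.head?_cons, Option.getD_some] at hfb
    have hbmem : b ∈ beginsOf ls := by rw [hbbs]; exact List.mem_cons_self
    obtain ⟨f, hf, _⟩ := mem_beginsOf hbmem
    rw [hbbs, show ((0 : Int) + 1) = ((1 : Nat) : Int) by simp, PySem.List.pyGet?_natCast]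
    simp only [List.map_cons, List.getElem?_cons_succ, List.getElem?_cons_zero]
    show PySem.List.slice (l :: ls) (some (((0:Nat) : Int) + 1)) (some (b + 1)) = _
    rw [hf] at hfb ⊢
    rw [slice_shift l ls _ _ (by omega) (by omega)]
    simp only [Nat.cast_zero]
    rw [PySem.List.slice_zero_start, PySem.List.slice_to _ (by omega)]
    simp only [Int.toNat_natCast]
    rw [show f = (ls.takeWhile (fun x => !sepL x)).length by exact_mod_cast hfb]
    exact take_takeWhile_sep ls

lemma aMap (lines : List String) :
    (PySem.List.enumerate (beginsOf lines)).map (pvABody lines) = specP lines := by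
  induction lines with
  | nil => simp [beginsOf, PySem.List.enumerate, specP]
  | cons l ls ih =>
    by_cases h : sepL l
    · have hB : beginsOf (l :: ls) = List.replicate 1 (0 : Int) ++ (beginsOf ls).map (· + 1) := by
        rw [beginsOf_cons, h]; rfl
      rw [hB, show List.replicate 1 (0 : Int) ++ (beginsOf ls).map (· + 1)
            = (0 : Int) :: (beginsOf ls).map (· + 1) from rfl]
      rw [PySem.List.enumerate_cons, List.map_cons]
      rw [show (0 : Int) + 1 = 0 + 1 from rfl, enumerate_shift, enumerate_map]
      simp only [List.map_map, Function.comp_def]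
      simp only [specP, h, if_pos]
      rw [bodyA_head l ls h, ← ih]
      simp only [List.cons.injEq, true_and]
      apply List.map_congr_left
      intro p hp
      obtain ⟨k, hklt, rfl⟩ := (PySem.List.mem_enumerate_iff _ _ _).mp hp
      obtain ⟨m, hbm, hmlt⟩ := mem_beginsOf (List.getElem_mem hklt)
      simp only [zero_add, hbm]
      have hs := bodyA_shift l ls 1 hB k m hklt hbm hmlt
      simpa using hs
    · have h' : sepL l = false := by simpa using h
      have hB : beginsOf (l :: ls) = List.replicate 0 (0 : Int) ++ (beginsOf ls).map (· + 1) := by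
        rw [beginsOf_cons, h']; rfl
      rw [hB, show List.replicate 0 (0 : Int) ++ (beginsOf ls).map (· + 1)
            = (beginsOf ls).map (· + 1) from rfl]
      rw [enumerate_map]
      simp only [List.map_map, Function.comp_def]
      simp only [specP, h', Bool.false_eq_true, if_neg, not_false_iff]
      rw [← ih]
      apply List.map_congr_left
      intro p hp
      obtain ⟨k, hklt, rfl⟩ := (PySem.List.mem_enumerate_iff _ _ _).mp hp
      obtain ⟨m, hbm, hmlt⟩ := mem_beginsOf (List.getElem_mem hklt)
      simp only [zero_add, hbm]
      have hs := bodyA_shift l ls 0 hB k m hklt hbm hmlt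
      simpa using hs

lemma aFold_eq_spec (lines : List String) :
    (PySem.List.enumerate (beginsOf lines)).foldl (fun acc ib => acc ++ [pvABody lines ib]) [] = specP lines := by
  rw [PySem.List.foldl_append_singleton_eq_map (pvABody lines) _ []]
  rw [List.nil_append]
  exact aMap lines

-- ===== VERDICT (by name: the statement is the Claim_ definition above) =====
theorem parse_obj_key_list_returns_spec : Claim_equal_parse_obj_key_list_returns := by
  intro key_lines _
  unfold Spec_parse_obj_key_list_returns
  show (PySem.List.enumerate (beginsOf (((PySem.Str.split? (PySem.Str.join "\n" (key_lines.map (fun line => PySem.Str.strip line))) "\n").getD [])))).foldl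
      (fun acc ib => acc ++ [pvABody (((PySem.Str.split? (PySem.Str.join "\n" (key_lines.map (fun line => PySem.Str.strip line))) "\n").getD [])) ib]) []
    = parse_obj_key_list_returns_alt key_lines
  rw [aFold_eq_spec]
  show specP _ = (match ((((PySem.Str.split? (PySem.Str.join "\n" (key_lines.map (fun line => PySem.Str.strip line))) "\n").getD [])).foldl pvBStep ([], none)).2 with
     | none => ((((PySem.Str.split? (PySem.Str.join "\n" (key_lines.map (fun line => PySem.Str.strip line))) "\n").getD [])).foldl pvBStep ([], none)).1
     | some d => ((((PySem.Str.split? (PySem.Str.join "\n" (key_lines.map (fun line => PySem.Str.strip line))) "\n").getD [])).foldl pvBStep ([], none)).1 ++ [pvBFin d])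
  rw [bLoop_none]
  rfl
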